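-- pv_equiv track=rewrite | github.com/f-labs-io/tdad-paper-code | scripts/testsmith.py | classify_test_failures
-- ===== SOURCE A (Python) =====
-- def classify_test_failures(pytest_output: str) -> tuple[list[str], list[str]]:
--     """
--     Classify test failures into infrastructure bugs vs expected assertion failures.
--
--     Returns:
--         (infrastructure_bugs, expected_failures) - lists of error descriptions
--     """
--     infrastructure_bugs = []
--     expected_failures = []
--
--     # Patterns for infrastructure bugs (test code is broken)
--     infra_patterns = [
--         "AttributeError:",
--         "NameError:",
--         "ImportError:",
--         "ModuleNotFoundError:",
--         "TypeError:",  # wrong number of args, wrong types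
--         "SyntaxError:",
--         "IndentationError:",
--         "fixture '",  # missing fixtures
--         "F821",  # ruff undefined variable
--         "E999",  # ruff syntax error
--     ]
--
--     # Split output into test failure blocks
--     lines = pytest_output.split("\n")
--
--     current_test = None
--     current_error_lines = []
--
--     for line in lines:
--         # Detect test failure header like "FAILED tests_visible/core/supportops/v1/test_foo.py::test_bar"
--         if line.startswith("FAILED ") or "::test_" in line and "FAILED" in line:
--             if current_test and current_error_lines:
--                 # Process previous test
--                 error_text = "\n".join(current_error_lines)
--                 is_infra_bug = any(p in error_text for p in infra_patterns)
--                 if is_infra_bug: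
--                     infrastructure_bugs.append(f"{current_test}:\n{error_text}")
--                 else:
--                     expected_failures.append(current_test)
--
--             current_test = line.replace("FAILED ", "").strip()
--             current_error_lines = []
--         elif current_test:
--             current_error_lines.append(line)
--
--     # Process last test
--     if current_test and current_error_lines:
--         error_text = "\n".join(current_error_lines)
--         is_infra_bug = any(p in error_text for p in infra_patterns)
--         if is_infra_bug:
--             infrastructure_bugs.append(f"{current_test}:\n{error_text}")
--         else:
--             expected_failures.append(current_test)
--
--     return infrastructure_bugs, expected_failures
-- ===== SOURCE B (Python) =====
-- def classify_test_failures(pytest_output: str) -> tuple[list[str], list[str]]: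
--     """Group the output into (test, error-lines) blocks in one pass, then
--     classify the blocks in a second pass (no duplicated tail handling)."""
--     infra_patterns = [
--         "AttributeError:",
--         "NameError:",
--         "ImportError:",
--         "ModuleNotFoundError:",
--         "TypeError:",
--         "SyntaxError:",
--         "IndentationError:",
--         "fixture '",
--         "F821",
--         "E999",
--     ]
--
--     def is_header(line):
--         return line.startswith("FAILED ") or ("::test_" in line and "FAILED" in line)
--
--     # Pass 1: group lines into blocks, one per failure header.
--     blocks = []
--     test = None
--     for line in pytest_output.split("\n"):
--         if is_header(line):
--             test = line.replace("FAILED ", "").strip()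
--             blocks.append((test, []))
--         elif test:
--             blocks[-1][1].append(line)
--
--     # Pass 2: classify every block that has error text.
--     infrastructure_bugs = []
--     expected_failures = []
--     for test, err_lines in blocks:
--         if err_lines:
--             error_text = "\n".join(err_lines)
--             if any(p in error_text for p in infra_patterns):
--                 infrastructure_bugs.append(f"{test}:\n{error_text}")
--             else:
--                 expected_failures.append(test)
--     return infrastructure_bugs, expected_failures
-- ===== Notes on version B (the rewrite author's own statement) =====
-- stated objective: simpler
-- what changed: Replaces the streaming classify-as-you-go loop with duplicated tail handling by a two-pass decomposition: one grouping pass that collects (test, error-lines) blocks, then one uniform classification pass over the blocks.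
import Mathlib
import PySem

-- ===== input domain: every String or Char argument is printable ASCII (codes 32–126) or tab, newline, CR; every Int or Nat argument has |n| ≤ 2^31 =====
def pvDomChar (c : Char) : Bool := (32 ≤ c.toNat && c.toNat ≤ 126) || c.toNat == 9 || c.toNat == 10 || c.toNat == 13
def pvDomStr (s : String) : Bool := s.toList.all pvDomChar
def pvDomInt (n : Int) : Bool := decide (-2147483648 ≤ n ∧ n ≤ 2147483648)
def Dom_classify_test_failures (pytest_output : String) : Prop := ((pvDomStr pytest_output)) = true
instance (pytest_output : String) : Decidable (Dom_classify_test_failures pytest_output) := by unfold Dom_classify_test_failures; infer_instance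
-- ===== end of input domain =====

-- B replaces A's streaming loop (with its duplicated tail handling) by a grouping pass
-- into (test, error-lines) blocks followed by a uniform classification pass: simpler decomposition.

-- shared constants / tiny helpers both Pythons contain verbatim
def pvInfraPatterns : List String :=
  ["AttributeError:", "NameError:", "ImportError:", "ModuleNotFoundError:", "TypeError:",
   "SyntaxError:", "IndentationError:", "fixture '", "F821", "E999"]

-- Python truthiness of `current_test` (None or "" are falsy)
def pvTruthy (o : Option String) : Bool := o.getD "" != ""

-- f"{t}:\n{e}" (string concatenation, exact on code points)
def pvFmt (t e : String) : String := String.ofList (t.toList ++ ':' :: '\n' :: e.toList)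

-- ===== PORT A =====
-- A's duplicated 'process previous/last test' block, updating (infrastructure_bugs, expected_failures)
def pvFinishA (st : Option String × List String × List String × List String) :
    List String × List String :=
  let (current_test, current_error_lines, infrastructure_bugs, expected_failures) := st
  if pvTruthy current_test && !current_error_lines.isEmpty then
    let error_text := PySem.Str.join "\n" current_error_lines
    if pvInfraPatterns.any (fun p => PySem.Str.isIn p error_text) then
      (infrastructure_bugs ++ [pvFmt (current_test.getD "") error_text], expected_failures)
    else
      (infrastructure_bugs, expected_failures ++ [current_test.getD ""])
  else (infrastructure_bugs, expected_failures)

-- loop body of A's single for-loop, state = (current_test, current_error_lines, infrastructure_bugs, expected_failures)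
def pvStepA (st : Option String × List String × List String × List String) (line : String) :
    Option String × List String × List String × List String :=
  let (current_test, current_error_lines, infrastructure_bugs, expected_failures) := st
  if PySem.Str.startswith line "FAILED " ||
      (PySem.Str.isIn "::test_" line && PySem.Str.isIn "FAILED" line) then
    let (ib, ef) := pvFinishA (current_test, current_error_lines, infrastructure_bugs, expected_failures)
    (some (PySem.Str.strip (PySem.Str.replace line "FAILED " "")), [], ib, ef)
  else if pvTruthy current_test then
    (current_test, current_error_lines ++ [line], infrastructure_bugs, expected_failures)
  else st

def classify_test_failures (pytest_output : String) : List String × List String :=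
  let lines := (PySem.Str.split? pytest_output "\n").getD []
  pvFinishA (lines.foldl pvStepA (none, [], [], []))

-- ===== PORT B =====
def pvIsHeader (line : String) : Bool :=
  PySem.Str.startswith line "FAILED " ||
    (PySem.Str.isIn "::test_" line && PySem.Str.isIn "FAILED" line)

-- blocks[-1][1].append(line)
def pvAppendLast : List (String × List String) → String → List (String × List String)
  | [], _ => []
  | [b], l => [(b.1, b.2 ++ [l])]
  | b :: bs, l => b :: pvAppendLast bs l

-- pass-1 body: state = (blocks, test)
def pvGroupStep (st : List (String × List String) × Option String) (line : String) :
    List (String × List String) × Option String :=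
  let (blocks, test) := st
  if pvIsHeader line then
    let t := PySem.Str.strip (PySem.Str.replace line "FAILED " "")
    (blocks ++ [(t, [])], some t)
  else if pvTruthy test then (pvAppendLast blocks line, test)
  else st

-- pass-2 body
def pvClassifyStep (acc : List String × List String) (b : String × List String) :
    List String × List String :=
  if b.2.isEmpty then acc
  else
    let error_text := PySem.Str.join "\n" b.2
    if pvInfraPatterns.any (fun p => PySem.Str.isIn p error_text) then
      (acc.1 ++ [pvFmt b.1 error_text], acc.2)
    else (acc.1, acc.2 ++ [b.1])

def classify_test_failures_alt (pytest_output : String) : List String × List String :=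
  let lines := (PySem.Str.split? pytest_output "\n").getD []
  let blocks := (lines.foldl pvGroupStep ([], none)).1
  blocks.foldl pvClassifyStep ([], [])

-- ===== PRECONDITION & SPEC =====
def Spec_classify_test_failures (pytest_output : String) (out : List String × List String) : Prop := out = classify_test_failures_alt pytest_output
instance (pytest_output : String) (out : List String × List String) : Decidable (Spec_classify_test_failures pytest_output out) := by unfold Spec_classify_test_failures; infer_instance

-- ===== CLAIM (what is proved, stated in full; the proofs are below) =====
def Claim_equal_classify_test_failures : Prop := ∀ (pytest_output : String), Dom_classify_test_failures pytest_output → Spec_classify_test_failures pytest_output (classify_test_failures pytest_output)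

-- ===== LEMMAS AND PROOFS =====

-- the name a header line opens
def pvName (line : String) : String := PySem.Str.strip (PySem.Str.replace line "FAILED " "")

-- the relation between A's loop state and B's pass-1 state
def pvR (ct : Option String) (errs ib ef : List String)
    (blocks : List (String × List String)) : Prop :=
  if pvTruthy ct then
    ∃ done, blocks = done ++ [(ct.getD "", errs)] ∧ done.foldl pvClassifyStep ([], []) = (ib, ef)
  else errs = [] ∧ blocks.foldl pvClassifyStep ([], []) = (ib, ef)

lemma pvAppendLast_append (done : List (String × List String)) (b : String × List String)
    (l : String) : pvAppendLast (done ++ [b]) l = done ++ [(b.1, b.2 ++ [l])] := by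
  induction done with
  | nil => rfl
  | cons x xs ih =>
    cases xs with
    | nil => simp [pvAppendLast]
    | cons y ys => simpa [pvAppendLast] using ih

-- pvFinishA is exactly one classification step on the pending block when a test is open …
lemma pvFinishA_truthy (ct : Option String) (errs ib ef : List String)
    (hct : pvTruthy ct = true) :
    pvFinishA (ct, errs, ib, ef) = pvClassifyStep (ib, ef) (ct.getD "", errs) := by
  simp only [pvFinishA, pvClassifyStep, hct, Bool.true_and]
  by_cases he : errs.isEmpty
  · simp [he]
  · simp [he]

-- … and the identity when no test is open
lemma pvFinishA_falsy (ct : Option String) (errs ib ef : List String)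
    (hct : ¬ pvTruthy ct = true) :
    pvFinishA (ct, errs, ib, ef) = (ib, ef) := by
  simp only [pvFinishA, Bool.not_eq_true] at *
  simp [hct]

-- a block with no error lines is skipped by the classification pass
lemma pvClassifyStep_empty (acc : List String × List String) (t : String) :
    pvClassifyStep acc (t, []) = acc := by simp [pvClassifyStep]

-- step-shape lemmas for the two loop bodies
lemma pvStepA_header (ct : Option String) (errs ib ef : List String) (l : String)
    (hH : pvIsHeader l = true) :
    pvStepA (ct, errs, ib, ef) l =
      (some (pvName l), [], (pvFinishA (ct, errs, ib, ef)).1, (pvFinishA (ct, errs, ib, ef)).2) := by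
  unfold pvStepA pvName
  rw [show (PySem.Str.startswith l "FAILED " ||
      (PySem.Str.isIn "::test_" l && PySem.Str.isIn "FAILED" l)) = pvIsHeader l from rfl, hH]
  rfl

lemma pvStepA_nonheader (ct : Option String) (errs ib ef : List String) (l : String)
    (hH : ¬ pvIsHeader l = true) :
    pvStepA (ct, errs, ib, ef) l =
      if pvTruthy ct then (ct, errs ++ [l], ib, ef) else (ct, errs, ib, ef) := by
  unfold pvStepA
  rw [show (PySem.Str.startswith l "FAILED " ||
      (PySem.Str.isIn "::test_" l && PySem.Str.isIn "FAILED" l)) = pvIsHeader l from rfl]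
  simp [hH]

lemma pvGroupStep_header (blocks : List (String × List String)) (test : Option String)
    (l : String) (hH : pvIsHeader l = true) :
    pvGroupStep (blocks, test) l = (blocks ++ [(pvName l, [])], some (pvName l)) := by
  unfold pvGroupStep pvName
  rw [hH]
  rfl

lemma pvGroupStep_nonheader (blocks : List (String × List String)) (test : Option String)
    (l : String) (hH : ¬ pvIsHeader l = true) :
    pvGroupStep (blocks, test) l =
      if pvTruthy test then (pvAppendLast blocks l, test) else (blocks, test) := by
  unfold pvGroupStep
  simp [hH]

-- main induction: from any pair of related states, A's remaining run and B's remaining run agree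
lemma pv_main (ls : List String) (ct : Option String) (errs ib ef : List String)
    (blocks : List (String × List String)) (h : pvR ct errs ib ef blocks) :
    pvFinishA (ls.foldl pvStepA (ct, errs, ib, ef)) =
      ((ls.foldl pvGroupStep (blocks, ct)).1).foldl pvClassifyStep ([], []) := by
  induction ls generalizing ct errs ib ef blocks with
  | nil =>
    simp only [List.foldl_nil]
    unfold pvR at h
    by_cases hct : pvTruthy ct = true
    · rw [if_pos hct] at h
      obtain ⟨done, hb, hc⟩ := h
      subst hb
      rw [List.foldl_append, hc, List.foldl_cons, List.foldl_nil, pvFinishA_truthy _ _ _ _ hct]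
    · rw [if_neg hct] at h
      obtain ⟨he, hc⟩ := h
      rw [pvFinishA_falsy _ _ _ _ hct, hc]
  | cons l ls ih =>
    simp only [List.foldl_cons]
    by_cases hH : pvIsHeader l = true
    · rw [pvStepA_header _ _ _ _ _ hH, pvGroupStep_header _ _ _ hH]
      generalize pvName l = t
      apply ih
      unfold pvR
      by_cases ht : pvTruthy (some t) = true
      · rw [if_pos ht]
        refine ⟨blocks, rfl, ?_⟩
        -- classify blocks = pvFinishA (ct, errs, ib, ef)
        unfold pvR at h
        by_cases hct : pvTruthy ct = true
        · rw [if_pos hct] at h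
          obtain ⟨done, hb, hc⟩ := h
          subst hb
          rw [List.foldl_append, hc, List.foldl_cons, List.foldl_nil,
            pvFinishA_truthy _ _ _ _ hct]
        · rw [if_neg hct] at h
          rw [pvFinishA_falsy _ _ _ _ hct, h.2]
      · rw [if_neg ht]
        refine ⟨rfl, ?_⟩
        rw [List.foldl_append, List.foldl_cons, List.foldl_nil, pvClassifyStep_empty]
        unfold pvR at h
        by_cases hct : pvTruthy ct = true
        · rw [if_pos hct] at h
          obtain ⟨done, hb, hc⟩ := h
          subst hb
          rw [List.foldl_append, hc, List.foldl_cons, List.foldl_nil,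
            pvFinishA_truthy _ _ _ _ hct]
        · rw [if_neg hct] at h
          rw [pvFinishA_falsy _ _ _ _ hct, h.2]
    · rw [pvStepA_nonheader _ _ _ _ _ hH, pvGroupStep_nonheader _ _ _ hH]
      by_cases hct : pvTruthy ct = true
      · rw [if_pos hct, if_pos hct]
        unfold pvR at h
        rw [if_pos hct] at h
        obtain ⟨done, hb, hc⟩ := h
        subst hb
        rw [pvAppendLast_append]
        apply ih
        unfold pvR
        rw [if_pos hct]
        exact ⟨done, rfl, hc⟩
      · rw [if_neg hct, if_neg hct]
        apply ih
        exact h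

-- ===== VERDICT (by name: the statement is the Claim_ definition above) =====
theorem classify_test_failures_spec : Claim_equal_classify_test_failures := by
  intro s _
  unfold Spec_classify_test_failures classify_test_failures classify_test_failures_alt
  exact pv_main _ none [] [] [] [] (by simp [pvR, pvTruthy])
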